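-- pv_equiv track=rewrite | github.com/kristigjerko301101/open-data-quality | script/p06_quality_measures.py | count_duplicates_column_pairs
-- ===== SOURCE A (Python) =====
-- def count_duplicates(col_list):
--     col_set = set(col_list)
--     element_count = [col_list.count(element) for element in col_set]
--     duplicates = [x for x in element_count if x > 1]
--     return sum(duplicates)
--
-- def count_duplicates_column_pairs(all_columns_list):
--     total_pair_duplicates = 0
--     for i in range(0, len(all_columns_list) - 1):
--         for j in range(i + 1, len(all_columns_list)):
--             first_col = all_columns_list[i]  # column1
--             second_col = all_columns_list[j]  # column2
--             pair_col = []  # column1+column2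
--             for a in range(0, len(first_col)):  # form the pairs
--                 new_el = str(first_col[a]) + str(second_col[a])
--                 pair_col.append(new_el)
--             duplicates = count_duplicates(pair_col)  # count pair duplicates
--             total_pair_duplicates += duplicates
--     return total_pair_duplicates
-- ===== SOURCE B (Python) =====
-- def _dup_total(keys):
--     # sort-then-scan: total occurrences belonging to runs of length > 1
--     total = 0
--     run = 0
--     prev = None
--     for k in sorted(keys):
--         if run > 0 and prev == k:
--             run += 1
--         else:
--             if run > 1:
--                 total += run
--             run = 1
--             prev = k
--     if run > 1:
--         total += run
--     return total
--
-- def count_duplicates_column_pairs(all_columns_list):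
--     total_pair_duplicates = 0
--     n = len(all_columns_list)
--     for i in range(0, n):
--         for j in range(i + 1, n):
--             keys = [str(x) + str(y) for x, y in zip(all_columns_list[i], all_columns_list[j])]
--             total_pair_duplicates += _dup_total(keys)
--     return total_pair_duplicates
-- ===== Notes on version B (the rewrite author's own statement) =====
-- stated objective: faster
-- what changed: The helper's per-distinct-element repeated list.count scan (quadratic per column pair) is replaced by sorting the pair keys once and walking the sorted list accumulating run lengths, adding each run length greater than 1.
import Mathlib
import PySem

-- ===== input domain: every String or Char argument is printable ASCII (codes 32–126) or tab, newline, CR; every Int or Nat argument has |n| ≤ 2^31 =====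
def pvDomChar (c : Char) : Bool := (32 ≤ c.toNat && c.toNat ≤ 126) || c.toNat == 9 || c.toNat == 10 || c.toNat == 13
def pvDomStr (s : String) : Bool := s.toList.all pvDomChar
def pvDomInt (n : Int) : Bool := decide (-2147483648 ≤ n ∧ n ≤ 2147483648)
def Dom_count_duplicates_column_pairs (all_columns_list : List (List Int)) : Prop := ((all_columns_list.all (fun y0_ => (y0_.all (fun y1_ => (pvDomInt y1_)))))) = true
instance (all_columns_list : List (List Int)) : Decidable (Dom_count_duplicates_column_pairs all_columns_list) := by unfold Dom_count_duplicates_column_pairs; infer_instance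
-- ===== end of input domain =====

-- B replaces the helper's repeated list.count scans by a sort + run-length scan of the pair keys (measured faster on large inputs).


-- ===== PORT A =====
-- count_duplicates: sum of col_list.count(e) over distinct elements e with count > 1
def pvCountDup (col_list : List String) : Int :=
  let col_set := PySem.Set.ofList col_list
  let element_count := col_set.map (fun e => (PySem.List.count col_list e : Int))
  let duplicates := element_count.filter (fun x => decide (1 < x))
  duplicates.sum

def count_duplicates_column_pairs (all_columns_list : List (List Int)) : Int :=
  (PySem.List.pyRange 0 ((all_columns_list.length : Int) - 1)).foldl (fun total_pair_duplicates i =>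
    (PySem.List.pyRange (i + 1) (all_columns_list.length : Int)).foldl (fun total_pair_duplicates j =>
      let first_col := PySem.List.pyGetD all_columns_list i []
      let second_col := PySem.List.pyGetD all_columns_list j []
      let pair_col := (PySem.List.pyRange 0 (first_col.length : Int)).foldl
        (fun pair_col a =>
          pair_col ++ [PySem.Int.toStr (PySem.List.pyGetD first_col a 0) ++
                       PySem.Int.toStr (PySem.List.pyGetD second_col a 0)]) []
      total_pair_duplicates + pvCountDup pair_col) total_pair_duplicates) 0

-- ===== PORT B =====
-- one step of the run-length scan over the sorted keys; state = (total, run, prev)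
def pvScanStep (acc : Int × Int × Option String) (k : String) : Int × Int × Option String :=
  if 0 < acc.2.1 ∧ acc.2.2 = some k then (acc.1, acc.2.1 + 1, acc.2.2)
  else (if 1 < acc.2.1 then acc.1 + acc.2.1 else acc.1, 1, some k)

-- _dup_total: sort the keys, scan runs, add every run length > 1
def pvDupTotal (keys : List String) : Int :=
  let st := (PySem.List.sorted keys (fun x => x)).foldl pvScanStep (0, 0, none)
  if 1 < st.2.1 then st.1 + st.2.1 else st.1

def count_duplicates_column_pairs_alt (all_columns_list : List (List Int)) : Int :=
  (PySem.List.pyRange 0 (all_columns_list.length : Int)).foldl (fun total_pair_duplicates i =>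
    (PySem.List.pyRange (i + 1) (all_columns_list.length : Int)).foldl (fun total_pair_duplicates j =>
      let keys := ((PySem.List.pyGetD all_columns_list i []).zip (PySem.List.pyGetD all_columns_list j [])).map
        (fun p => PySem.Int.toStr p.1 ++ PySem.Int.toStr p.2)
      total_pair_duplicates + pvDupTotal keys) total_pair_duplicates) 0

-- ===== PRECONDITION & SPEC =====
-- Pre_ excludes exactly the inputs on which A raises IndexError: some earlier column longer
-- than a later one (A indexes the later column at every row index of the earlier one).
def Pre_count_duplicates_column_pairs (all_columns_list : List (List Int)) : Prop :=
  all_columns_list.Pairwise (fun c d => c.length ≤ d.length)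
instance (all_columns_list : List (List Int)) : Decidable (Pre_count_duplicates_column_pairs all_columns_list) := by unfold Pre_count_duplicates_column_pairs; infer_instance

def pvWitness_count_duplicates_column_pairs : List (List Int) := [[1, 2, 1], [3, 3, 4]]

def Spec_count_duplicates_column_pairs (all_columns_list : List (List Int)) (out : Int) : Prop := out = count_duplicates_column_pairs_alt all_columns_list
instance (all_columns_list : List (List Int)) (out : Int) : Decidable (Spec_count_duplicates_column_pairs all_columns_list out) := by unfold Spec_count_duplicates_column_pairs; infer_instance

-- ===== CLAIM (what is proved, stated in full; the proofs are below) =====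
def Claim_equal_count_duplicates_column_pairs : Prop := ∀ (all_columns_list : List (List Int)), Dom_count_duplicates_column_pairs all_columns_list → Pre_count_duplicates_column_pairs all_columns_list → Spec_count_duplicates_column_pairs all_columns_list (count_duplicates_column_pairs all_columns_list)

-- ===== LEMMAS AND PROOFS =====

-- canonical duplicate count: number of positions whose value occurs more than once
def pvDcanon (l : List String) : Int :=
  ((l.filter (fun x => decide (1 < l.count x))).length : Int)

lemma pvSum_filter_map_count (u l : List String) :
    ((u.map (fun e => (l.count e : Int))).filter (fun x => decide (1 < x))).sum
      = (u.map (fun e => if 1 < l.count e then (l.count e : Int) else 0)).sum := by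
  induction u with
  | nil => simp
  | cons a u ih =>
    by_cases h : 1 < l.count a <;>
      simp [h, ih]

lemma pvCountDup_eq (l : List String) : pvCountDup l = pvDcanon l := by
  unfold pvCountDup pvDcanon
  rw [← PySem.List.dedup_eq_ofList]
  simp only [PySem.List.count_eq]
  rw [pvSum_filter_map_count (PySem.List.dedup l) l]
  rw [← List.sum_toFinset _ (PySem.List.nodup_dedup l)]
  have htf : (PySem.List.dedup l).toFinset = l.toFinset := by
    ext x; simp
  rw [htf]
  set lf := l.filter (fun x => decide (1 < l.count x)) with hlf
  have hsub : lf.toFinset ⊆ l.toFinset := by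
    intro x hx
    simp only [List.mem_toFinset, hlf, List.mem_filter] at hx ⊢
    exact hx.1
  rw [← Finset.sum_subset hsub (by
    intro x hx hnx
    simp only [List.mem_toFinset, hlf, List.mem_filter] at hx hnx
    have : ¬ 1 < l.count x := by
      intro h; exact hnx ⟨hx, by simpa using h⟩
    simp [this])]
  have hcong : ∀ x ∈ lf.toFinset,
      (if 1 < l.count x then (l.count x : Int) else 0) = (lf.count x : Int) := by
    intro x hx
    simp only [List.mem_toFinset, hlf, List.mem_filter, decide_eq_true_eq] at hx
    rw [if_pos hx.2, hlf, List.count_filter (by simpa using hx.2)]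
  rw [Finset.sum_congr rfl hcong]
  rw [← Nat.cast_sum, List.sum_toFinset_count_eq_length]

lemma pvDcanon_perm {l l' : List String} (h : l.Perm l') : pvDcanon l = pvDcanon l' := by
  unfold pvDcanon
  rw [List.filter_congr (fun x _ => by rw [h.count_eq])]
  rw [← List.countP_eq_length_filter, ← List.countP_eq_length_filter, h.countP_eq]

lemma pvDcanon_split (a : String) (n : Nat) (m : List String) (ha : a ∉ m) :
    pvDcanon (List.replicate n a ++ m) = (if 1 < n then (n : Int) else 0) + pvDcanon m := by
  unfold pvDcanon
  have hca : (List.replicate n a ++ m).count a = n := by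
    simp [List.count_append, List.count_eq_zero.mpr ha]
  have hcm : ∀ x ∈ m, (List.replicate n a ++ m).count x = m.count x := by
    intro x hx
    have hxa : x ∉ List.replicate n a := by
      intro hmem; exact ha (List.eq_of_mem_replicate hmem ▸ hx)
    rw [List.count_append, List.count_eq_zero.mpr hxa, Nat.zero_add]
  rw [List.filter_append]
  have hrep : (List.replicate n a).filter (fun x => decide (1 < (List.replicate n a ++ m).count x))
      = if 1 < n then List.replicate n a else [] := by
    split_ifs with hn
    · apply List.filter_eq_self.mpr
      intro x hx
      rw [List.eq_of_mem_replicate hx]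
      simpa [hca] using hn
    · apply List.filter_eq_nil_iff.mpr
      intro x hx
      rw [List.eq_of_mem_replicate hx]
      simpa [hca] using hn
  have hm : m.filter (fun x => decide (1 < (List.replicate n a ++ m).count x))
      = m.filter (fun x => decide (1 < m.count x)) :=
    List.filter_congr (fun x hx => by rw [hcm x hx])
  rw [hrep, hm, List.length_append]
  split_ifs with hn <;> simp

lemma pvScan_inv (s : List String) : ∀ (cur : String) (n : Nat) (tot : Int),
    1 ≤ n → s.Pairwise (· ≤ ·) → (∀ y ∈ s, cur ≤ y) →
    (if 1 < (s.foldl pvScanStep (tot, (n : Int), some cur)).2.1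
     then (s.foldl pvScanStep (tot, (n : Int), some cur)).1 +
          (s.foldl pvScanStep (tot, (n : Int), some cur)).2.1
     else (s.foldl pvScanStep (tot, (n : Int), some cur)).1)
      = tot + pvDcanon (List.replicate n cur ++ s) := by
  induction s with
  | nil =>
    intro cur n tot hn _ _
    rw [List.foldl_nil]
    rw [pvDcanon_split cur n [] (by simp)]
    have : pvDcanon [] = 0 := by simp [pvDcanon]
    rw [this]
    split_ifs with h1 h2 <;> push_cast at * <;> omega
  | cons k t ih =>
    intro cur n tot hn hpw hge
    have hpw' := (List.pairwise_cons.mp hpw)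
    by_cases hk : cur = k
    · have hstep : pvScanStep (tot, (n : Int), some cur) k = (tot, ((n + 1 : Nat) : Int), some cur) := by
        unfold pvScanStep
        have h0n : (0 : Int) < (n : Int) := by exact_mod_cast Nat.lt_of_lt_of_le Nat.zero_lt_one hn
        rw [if_pos ⟨h0n, by rw [hk]⟩]
        push_cast; rfl
      rw [List.foldl_cons, hstep]
      rw [ih cur (n + 1) tot (by omega) hpw'.2 (fun y hy => hk ▸ hpw'.1 y hy)]
      congr 1
      apply pvDcanon_perm
      rw [List.replicate_succ' (n := n), List.append_assoc, hk]
      simp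
    · have hstep : pvScanStep (tot, (n : Int), some cur) k
          = (if 1 < (n : Int) then tot + n else tot, ((1 : Nat) : Int), some k) := by
        unfold pvScanStep
        rw [if_neg (by rintro ⟨-, h⟩; exact hk (by simpa using h))]
        rfl
      rw [List.foldl_cons, hstep]
      rw [ih k 1 _ le_rfl hpw'.2 (fun y hy => hpw'.1 y hy)]
      have hcurk : cur < k := lt_of_le_of_ne (hge k (by simp)) hk
      have hnotin : cur ∉ k :: t := by
        intro hmem
        rcases List.mem_cons.mp hmem with h | h
        · exact hk h
        · exact absurd (hpw'.1 cur h) (not_le.mpr hcurk)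
      rw [pvDcanon_split cur n (k :: t) hnotin]
      have : List.replicate 1 k ++ t = k :: t := by simp
      rw [this]
      split_ifs with h1 h2 <;> push_cast at * <;> omega

lemma pvDupTotal_eq (keys : List String) : pvDupTotal keys = pvDcanon keys := by
  unfold pvDupTotal
  rcases hs : PySem.List.sorted keys (fun x => x) with _ | ⟨c, t⟩
  · have : keys = [] := (PySem.List.sorted_eq_nil_iff keys (fun x => x) false).mp hs
    subst this
    simp [pvDcanon]
  · have hperm : (c :: t).Perm keys := hs ▸ PySem.List.sorted_perm keys (fun x => x) false
    have hpw : (c :: t).Pairwise (fun a b : String => a ≤ b) := by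
      have := PySem.List.sorted_pairwise keys (fun x => x)
      rwa [hs] at this
    have hpw' := List.pairwise_cons.mp hpw
    have hstep : pvScanStep (0, 0, none) c = (0, ((1 : Nat) : Int), some c) := by
      unfold pvScanStep
      rw [if_neg (by rintro ⟨h, -⟩; exact absurd h (lt_irrefl 0))]
      norm_num
    rw [List.foldl_cons, hstep]
    rw [pvScan_inv t c 1 0 le_rfl hpw'.2 hpw'.1]
    rw [zero_add]
    have : List.replicate 1 c ++ t = c :: t := by simp
    rw [this]
    exact pvDcanon_perm hperm

lemma pvMap_range_zip (f : List Int) : ∀ (s : List Int), f.length ≤ s.length →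
    (List.range f.length).map
        (fun k => PySem.Int.toStr (f.getD k 0) ++ PySem.Int.toStr (s.getD k 0))
      = (f.zip s).map (fun p => PySem.Int.toStr p.1 ++ PySem.Int.toStr p.2) := by
  induction f with
  | nil => intro s _; simp
  | cons x f ih =>
    intro s hlen
    cases s with
    | nil => simp at hlen
    | cons y s =>
      rw [List.length_cons, List.range_succ_eq_map]
      simp only [List.map_cons, List.map_map, List.zip_cons_cons, List.getD_cons_zero]
      rw [← ih s (by simpa using hlen)]
      congr 1

lemma pvPair_col_eq (f s : List Int) (h : f.length ≤ s.length) :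
    (PySem.List.pyRange 0 (f.length : Int)).foldl
      (fun pc a => pc ++ [PySem.Int.toStr (PySem.List.pyGetD f a 0) ++
                          PySem.Int.toStr (PySem.List.pyGetD s a 0)]) []
      = (f.zip s).map (fun p => PySem.Int.toStr p.1 ++ PySem.Int.toStr p.2) := by
  rw [PySem.List.foldl_append_singleton_eq_map, List.nil_append]
  rw [PySem.List.pyRange_one]
  simp only [zero_add, sub_zero, Int.toNat_natCast, List.map_map]
  rw [← pvMap_range_zip f s h]
  apply List.map_congr_left
  intro k _
  simp [Function.comp, PySem.List.pyGetD_natCast]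

-- per-i contribution, written with the canonical duplicate count
def pvTerm (l : List (List Int)) (i : Int) : Int :=
  ((PySem.List.pyRange (i + 1) (l.length : Int)).map (fun j =>
     pvDcanon (((PySem.List.pyGetD l i []).zip (PySem.List.pyGetD l j [])).map
       (fun p => PySem.Int.toStr p.1 ++ PySem.Int.toStr p.2)))).sum

lemma pvGetD_eq_getElem (l : List (List Int)) (i : Int) (h0 : 0 ≤ i) (hlt : i.toNat < l.length) :
    PySem.List.pyGetD l i [] = l[i.toNat] := by
  rw [PySem.List.pyGetD_of_nonneg l [] h0, List.getD_eq_getElem l [] hlt]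

lemma pvA_eq_sum (l : List (List Int)) (hpre : l.Pairwise (fun c d => c.length ≤ d.length)) :
    count_duplicates_column_pairs l
      = ((PySem.List.pyRange 0 ((l.length : Int) - 1)).map (pvTerm l)).sum := by
  unfold count_duplicates_column_pairs
  simp only [PySem.List.foldl_add, zero_add]
  apply congrArg
  apply List.map_congr_left
  intro i hi
  rw [PySem.List.mem_pyRange_one] at hi
  unfold pvTerm
  apply congrArg
  apply List.map_congr_left
  intro j hj
  rw [PySem.List.mem_pyRange_one] at hj
  have h0i : 0 ≤ i := hi.1
  have h0j : 0 ≤ j := le_trans (by omega) hj.1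
  have hiltn : i.toNat < l.length := by omega
  have hjltn : j.toNat < l.length := by omega
  have hij : i.toNat < j.toNat := by omega
  rw [pvGetD_eq_getElem l i h0i hiltn, pvGetD_eq_getElem l j h0j hjltn]
  have hlen : (l[i.toNat]).length ≤ (l[j.toNat]).length :=
    List.pairwise_iff_getElem.mp hpre i.toNat j.toNat hiltn hjltn hij
  rw [pvCountDup_eq, pvPair_col_eq _ _ hlen]

lemma pvB_eq_sum (l : List (List Int)) :
    count_duplicates_column_pairs_alt l
      = ((PySem.List.pyRange 0 (l.length : Int)).map (pvTerm l)).sum := by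
  unfold count_duplicates_column_pairs_alt pvTerm
  simp only [PySem.List.foldl_add, zero_add, pvDupTotal_eq]

-- ===== VERDICT (by name: the statement is the Claim_ definition above) =====
theorem count_duplicates_column_pairs_spec : Claim_equal_count_duplicates_column_pairs := by
  intro l _ hpre
  unfold Spec_count_duplicates_column_pairs
  rw [pvA_eq_sum l hpre, pvB_eq_sum l]
  rcases Nat.eq_zero_or_pos l.length with h0 | hpos
  · rw [h0]; norm_num
  · have hsplit : PySem.List.pyRange 0 (l.length : Int)
        = PySem.List.pyRange 0 ((l.length : Int) - 1) ++ [(l.length : Int) - 1] := by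
      have := PySem.List.pyRange_one_succ_right (a := 0) (b := (l.length : Int) - 1) (by omega)
      rw [← this]
      congr 1
      omega
    rw [hsplit, List.map_append, List.sum_append]
    have hlast : pvTerm l ((l.length : Int) - 1) = 0 := by
      unfold pvTerm
      rw [PySem.List.pyRange_one_eq_nil (by omega)]
      simp
    simp [hlast]
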